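-- pv_equiv track=rewrite | github.com/Thitouane/Puissance4 | Puissance4/connect4.py | lc_diagonalesv1_5
-- ===== SOURCE A (Python) =====
-- def nr(g):
--     '''Renvoie le nombres de lignes de la grille g
--        :param g:(list) une liste qui représente la grille
--        :return:(int) le nombre de lignes trouvé dans cette grille
--        CU:g une grille valide
--        Exemples:
--
--        >>> nr([[0, 0, 0, 0, 0, 0, 0], [0, 0, 0, 0, 0, 0, 0], [0, 0, 0, 0, 0, 0, 0], [0, 0, 0, 0, 0, 0, 0], [0, 0, 0, 0, 0, 0, 0], [0, 0, 0, 0, 0, 0, 0]])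
--        6
--        >>> nr([[0, 0, 0, 0], [0, 0, 0, 0], [0, 0, 0, 0]])
--        3
--     '''
--     return len(g)
--
-- def nc(g):
--     '''Renvoie le nombres de colonnes de la grille g
--        :param g:(list) une liste qui représente la grille
--        :return:(int) le nombre de colonne trouvé dans cette grille
--        CU:g une grille valide
--        Exemples:
--
--        >>> nc([[0, 0, 0, 0, 0, 0, 0], [0, 0, 0, 0, 0, 0, 0], [0, 0, 0, 0, 0, 0, 0], [0, 0, 0, 0, 0, 0, 0], [0, 0, 0, 0, 0, 0, 0], [0, 0, 0, 0, 0, 0, 0]])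
--        7
--        >>> nc([[0, 0, 0, 0], [0, 0, 0, 0], [0, 0, 0, 0]])
--        4
--     '''
--     return len(g[0])
--
-- def lc_diagonalesv1_5(g,r,c):
--     '''Construit et renvoie la liste des coordonnées des cases avec la valeur de la case pour la première diagonale
--        :param g:(list) une liste qui représente la grille
--        :param c:(int) coordonnée de la colonne testé
--        :param r:(int) coordonnée de la ligne testé
--        :retrun:(list) la liste des coordonnées des cases
--        CU: c une colonne de g et r une ligne de g
--     '''
--     lc=[]
--     for j in range (-4,5):
--         x = r + j
--         y = c + j
--         if x>=0 and x<nr(g) and y >=0 and y<nc(g):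
--             lc.append((x,y))
--     return lc
-- ===== SOURCE B (Python) =====
-- def lc_diagonalesv1_5(g, r, c):
--     if not g:
--         return []
--     jlo = max(-4, -r, -c)
--     jhi = min(4, len(g) - 1 - r, len(g[0]) - 1 - c)
--     return [(r + j, c + j) for j in range(jlo, jhi + 1)]
-- ===== Notes on version B (the rewrite author's own statement) =====
-- stated objective: simpler
-- what changed: B computes the contiguous valid offset interval [jlo, jhi] in closed form (maxes/mins of the bounds) and emits the cells directly over range(jlo, jhi+1), replacing A's scan of all 9 offsets with a per-offset four-way bounds test.
import Mathlib
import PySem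

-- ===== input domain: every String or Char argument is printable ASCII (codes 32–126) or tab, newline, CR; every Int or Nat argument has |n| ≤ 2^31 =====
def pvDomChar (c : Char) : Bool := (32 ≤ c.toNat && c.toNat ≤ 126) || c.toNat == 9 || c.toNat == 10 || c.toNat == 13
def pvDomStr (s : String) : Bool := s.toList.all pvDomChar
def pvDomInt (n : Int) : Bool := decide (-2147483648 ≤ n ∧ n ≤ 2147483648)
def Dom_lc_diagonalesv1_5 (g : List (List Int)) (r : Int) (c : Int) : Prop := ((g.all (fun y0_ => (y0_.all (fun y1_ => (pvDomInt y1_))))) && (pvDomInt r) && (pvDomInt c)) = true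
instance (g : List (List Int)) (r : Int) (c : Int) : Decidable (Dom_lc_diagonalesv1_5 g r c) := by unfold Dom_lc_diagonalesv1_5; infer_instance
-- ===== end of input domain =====

-- B replaces A's scan of all 9 offsets (with a four-way bounds test each) by the closed-form
-- valid offset interval [jlo, jhi] and a direct range loop (objective: simpler).

-- ===== PORT A =====
-- nr(g) = len(g)
def pvNr (g : List (List Int)) : Int := (g.length : Int)
-- nc(g) = len(g[0]); the .getD [] only totalises: A's condition short-circuits before
-- evaluating nc(g) whenever g = [], so the default value is never observed.
def pvNc (g : List (List Int)) : Int := (((PySem.List.pyGet? g 0).getD []).length : Int)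

def lc_diagonalesv1_5 (g : List (List Int)) (r : Int) (c : Int) : List (Int × Int) :=
  (PySem.List.pyRange (-4) 5 1).foldl (fun lc j =>
    let x := r + j
    let y := c + j
    if 0 ≤ x ∧ x < pvNr g ∧ 0 ≤ y ∧ y < pvNc g then lc ++ [(x, y)] else lc) []

-- ===== PORT B =====
def lc_diagonalesv1_5_alt (g : List (List Int)) (r : Int) (c : Int) : List (Int × Int) :=
  match g with
  | [] => []
  | row0 :: _ =>
    let jlo := max (-4) (max (-r) (-c))
    let jhi := min 4 (min ((g.length : Int) - 1 - r) ((row0.length : Int) - 1 - c))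
    (PySem.List.pyRange jlo (jhi + 1) 1).map (fun j => (r + j, c + j))

-- ===== PRECONDITION & SPEC =====
def Spec_lc_diagonalesv1_5 (g : List (List Int)) (r : Int) (c : Int) (out : List (Int × Int)) : Prop := out = lc_diagonalesv1_5_alt g r c
instance (g : List (List Int)) (r : Int) (c : Int) (out : List (Int × Int)) : Decidable (Spec_lc_diagonalesv1_5 g r c out) := by unfold Spec_lc_diagonalesv1_5; infer_instance

-- ===== CLAIM (what is proved, stated in full; the proofs are below) =====
def Claim_equal_lc_diagonalesv1_5 : Prop := ∀ (g : List (List Int)) (r : Int) (c : Int), Dom_lc_diagonalesv1_5 g r c → Spec_lc_diagonalesv1_5 g r c (lc_diagonalesv1_5 g r c)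

-- ===== LEMMAS AND PROOFS =====

-- Filtering a step-1 range by a contiguous interval condition yields the clipped range.
theorem pv_filter_interval (lo hi : Int) : ∀ (n : Nat) (a b : Int), (b - a).toNat = n →
    (PySem.List.pyRange a b 1).filter (fun j => decide (lo ≤ j ∧ j < hi))
      = PySem.List.pyRange (max a lo) (min b hi) 1 := by
  intro n
  induction n with
  | zero =>
    intro a b h
    rw [PySem.List.pyRange_one_eq_nil (by omega), PySem.List.pyRange_one_eq_nil (by omega)]
    rfl
  | succ k ih =>
    intro a b h
    rw [PySem.List.pyRange_one_cons (by omega), List.filter_cons, ih (a + 1) b (by omega)]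
    by_cases hm : lo ≤ a ∧ a < hi
    · rw [if_pos (by simpa using hm), max_eq_left hm.1, max_eq_left (by omega)]
      conv_rhs => rw [PySem.List.pyRange_one_cons (by omega : a < min b hi)]
    · rw [if_neg (by simpa using hm)]
      rcases (by omega : a < lo ∨ hi ≤ a) with hl | hr
      · congr 1 <;> omega
      · rw [PySem.List.pyRange_one_eq_nil (by omega), PySem.List.pyRange_one_eq_nil (by omega)]

-- ===== VERDICT (by name: the statement is the Claim_ definition above) =====
theorem lc_diagonalesv1_5_spec : Claim_equal_lc_diagonalesv1_5 := by
  intro g r c _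
  show lc_diagonalesv1_5 g r c = lc_diagonalesv1_5_alt g r c
  unfold lc_diagonalesv1_5 lc_diagonalesv1_5_alt
  rw [PySem.List.foldl_append_ite]
  cases g with
  | nil =>
    simp only [List.nil_append]
    rw [List.filter_eq_nil_iff.mpr ?_, List.map_nil]
    intro j _
    simp only [pvNr, List.length_nil, decide_eq_true_eq]
    omega
  | cons row0 rest =>
    simp only [List.nil_append]
    have hfc : ∀ j ∈ PySem.List.pyRange (-4) 5 1,
        (decide (0 ≤ r + j ∧ r + j < pvNr (row0 :: rest) ∧ 0 ≤ c + j ∧ c + j < pvNc (row0 :: rest)))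
          = (decide (max (-r) (-c) ≤ j ∧ j < min (((row0 :: rest).length : Int) - r) ((row0.length : Int) - c))) := by
      intro j _
      have hnc : pvNc (row0 :: rest) = (row0.length : Int) := by
        simp [pvNc, PySem.List.pyGet?, PySem.List.pyIdx?]
      simp only [pvNr, hnc, decide_eq_decide, List.length_cons]
      push_cast
      omega
    rw [List.filter_congr hfc, pv_filter_interval _ _ ((5 - (-4)).toNat) (-4) 5 rfl]
    congr 1
    congr 1 <;> omega
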